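-- pv_equiv track=rewrite | github.com/KD6752/My-Projects | Python_Coding1/hw2.py | bit_and
-- ===== SOURCE A (Python) =====
-- def bit_and(a, b):
--     max_len = max(len(a), len(b))  # finding maximum length between two string
--
--     mod_a = a.zfill(max_len)  # filling string with zero to make same length
--     mod_b = b.zfill(max_len)
--
--     new_string = []  # new list will be made after adding element after bitwise And operation
--     for i, j in zip(mod_a, mod_b):
--         if i == "1" and j == "1":  # using bitwise And operation rule
--             new_string.append(1)
--         else:
--             new_string.append(0)
--     # converting list of 1s and 0s to base 10 number
--     decimal_num = 0
--     string_len = len(new_string)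
--     for num in new_string:
--         decimal_num += num * 2 ** (string_len - 1)
--         string_len = string_len - 1
--
--     return decimal_num
-- ===== SOURCE B (Python) =====
-- def bit_and(a, b):
--     # Horner single pass: no intermediate bit list, no 2**k powers.
--     max_len = max(len(a), len(b))
--     result = 0
--     for i, j in zip(a.zfill(max_len), b.zfill(max_len)):
--         result = result * 2 + (1 if i == "1" and j == "1" else 0)
--     return result
-- ===== Notes on version B (the rewrite author's own statement) =====
-- stated objective: faster
-- what changed: Replaces A's two-phase scheme (build a bit list, then sum it with explicit 2**(k-1) positional weights and a decreasing counter) by a single Horner pass accumulating result = result*2 + bit, with no intermediate list and no power computations.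
import Mathlib
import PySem

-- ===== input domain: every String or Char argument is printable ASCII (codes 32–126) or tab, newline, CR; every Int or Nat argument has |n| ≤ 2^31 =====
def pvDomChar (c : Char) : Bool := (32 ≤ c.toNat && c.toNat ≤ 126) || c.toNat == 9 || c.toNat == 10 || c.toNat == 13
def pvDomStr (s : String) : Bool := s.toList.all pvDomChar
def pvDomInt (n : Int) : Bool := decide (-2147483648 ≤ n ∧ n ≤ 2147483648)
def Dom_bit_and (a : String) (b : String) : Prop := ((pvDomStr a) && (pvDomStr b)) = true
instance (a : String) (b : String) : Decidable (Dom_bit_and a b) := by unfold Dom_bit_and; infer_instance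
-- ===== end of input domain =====

-- B replaces A's bit list + explicit 2**(k-1) positional weights by a single Horner pass (simpler).

-- ===== PORT A =====
def bit_and (a : String) (b : String) : Int :=
  let maxLen : Int := max (PySem.Str.len a) (PySem.Str.len b)
  let modA := PySem.Chars.zfill a.toList maxLen
  let modB := PySem.Chars.zfill b.toList maxLen
  let newString : List Int :=
    (modA.zip modB).foldl
      (fun ns ij => ns ++ [if ij.1 = '1' ∧ ij.2 = '1' then (1 : Int) else 0]) []
  let p :=
    newString.foldl
      (fun (p : Int × Int) num => (p.1 + num * 2 ^ (p.2 - 1).toNat, p.2 - 1))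
      (0, (newString.length : Int))
  p.1

-- ===== PORT B =====
def bit_and_alt (a : String) (b : String) : Int :=
  let maxLen : Int := max (PySem.Str.len a) (PySem.Str.len b)
  ((PySem.Chars.zfill a.toList maxLen).zip (PySem.Chars.zfill b.toList maxLen)).foldl
    (fun r ij => r * 2 + (if ij.1 = '1' ∧ ij.2 = '1' then (1 : Int) else 0)) 0

-- ===== PRECONDITION & SPEC =====
def Spec_bit_and (a : String) (b : String) (out : Int) : Prop := out = bit_and_alt a b
instance (a : String) (b : String) (out : Int) : Decidable (Spec_bit_and a b out) := by unfold Spec_bit_and; infer_instance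

-- ===== CLAIM (what is proved, stated in full; the proofs are below) =====
def Claim_equal_bit_and : Prop := ∀ (a : String) (b : String), Dom_bit_and a b → Spec_bit_and a b (bit_and a b)

-- ===== LEMMAS AND PROOFS =====

-- Horner fold from an arbitrary accumulator splits off the accumulator with weight 2^length.
theorem horner_acc (xs : List Int) (c : Int) :
    xs.foldl (fun r x => r * 2 + x) c
      = c * 2 ^ xs.length + xs.foldl (fun r x => r * 2 + x) 0 := by
  induction xs generalizing c with
  | nil => simp
  | cons x xs ih =>
    simp only [List.foldl_cons, List.length_cons]
    rw [ih (c * 2 + x), ih (0 * 2 + x)]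
    ring

-- A's positional-weight sum with a decreasing counter equals the Horner fold.
theorem posSum_eq_horner (bits : List Int) (d : Int) :
    (bits.foldl (fun (p : Int × Int) num => (p.1 + num * 2 ^ (p.2 - 1).toNat, p.2 - 1))
        (d, (bits.length : Int))).1
      = d + bits.foldl (fun r x => r * 2 + x) 0 := by
  induction bits generalizing d with
  | nil => simp
  | cons x xs ih =>
    simp only [List.foldl_cons, List.length_cons]
    have h1 : ((((xs.length + 1 : Nat) : Int)) - 1).toNat = xs.length := by
      push_cast; omega
    have h2 : (((xs.length + 1 : Nat) : Int)) - 1 = (xs.length : Int) := by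
      push_cast; ring
    rw [h1, h2, ih (d + x * 2 ^ xs.length), horner_acc xs (0 * 2 + x)]
    ring

-- ===== VERDICT (by name: the statement is the Claim_ definition above) =====
theorem bit_and_spec : Claim_equal_bit_and := by
  intro a b _
  unfold Spec_bit_and bit_and bit_and_alt
  simp only []
  set zs := (PySem.Chars.zfill a.toList (max (PySem.Str.len a) (PySem.Str.len b))).zip
      (PySem.Chars.zfill b.toList (max (PySem.Str.len a) (PySem.Str.len b))) with hzs
  rw [PySem.List.foldl_append_singleton_eq_map]
  rw [posSum_eq_horner, zero_add, List.nil_append, List.foldl_map]
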